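-- pv_equiv track=rewrite | github.com/adum/robotsrevenge | scripts/generate_levels_v6_weaver.py | format_reject_counts
-- ===== SOURCE A (Python) =====
-- REJECT_CODE_ORDER = (
--     "mj",  # meaningless jump
--     "ct",  # trace failed
--     "ms",  # min steps not met
--     "js",  # missing jump/sense execution
--     "sb",  # missing sense branch split
--     "de",  # decoy escaped (ambiguous exit)
--     "se",  # straight escape lane from start
--     "ot",  # one-turn escape path from start
--     "ne",  # replay did not escape
--     "tc",  # immediate turn cancel
--     "ux",  # unused/dead instructions
--     "sr",  # straight-run limit hit
--     "np",  # no movement-only path to exit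
--     "md",  # min direction types to exit not met
--     "dn",  # density out of bounds
--     "pl",  # easy short program exists
-- )
--
-- def format_reject_counts(reject_counts: dict[str, int]) -> str:
--     if not reject_counts:
--         return "-"
--     parts: list[str] = []
--     seen: set[str] = set()
--     for code in REJECT_CODE_ORDER:
--         count = reject_counts.get(code, 0)
--         if count <= 0:
--             continue
--         parts.append(f"{code}={count}")
--         seen.add(code)
--     for code in sorted(reject_counts):
--         if code in seen:
--             continue
--         count = reject_counts[code]
--         if count <= 0:
--             continue
--         parts.append(f"{code}={count}")
--     return " ".join(parts) if parts else "-"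
-- ===== SOURCE B (Python) =====
-- REJECT_CODE_ORDER = (
--     "mj", "ct", "ms", "js", "sb", "de", "se", "ot",
--     "ne", "tc", "ux", "sr", "np", "md", "dn", "pl",
-- )
--
-- RANK = {code: i for i, code in enumerate(REJECT_CODE_ORDER)}
--
-- def format_reject_counts(reject_counts: dict[str, int]) -> str:
--     # Bucket placement: one pass over the items drops each known code's count
--     # into its fixed slot; unknown codes are collected aside and sorted.
--     slots = [0] * len(REJECT_CODE_ORDER)
--     extras: list[tuple[str, int]] = []
--     for code, count in reject_counts.items():
--         i = RANK.get(code)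
--         if i is None:
--             extras.append((code, count))
--         else:
--             slots[i] = count
--     parts = [f"{c}={n}" for c, n in zip(REJECT_CODE_ORDER, slots) if n > 0]
--     parts += [f"{c}={n}" for c, n in sorted(extras, key=lambda p: p[0]) if n > 0]
--     return " ".join(parts) if parts else "-"
-- ===== Notes on version B (the rewrite author's own statement) =====
-- stated objective: alternative
-- what changed: A scans the 16-code fixed order doing a dict lookup per code and then re-walks the sorted keys against a seen-set; B instead makes one bucket-placement pass over the items, dropping each known code's count into a fixed slot array indexed by rank and collecting unknown (code,count) pairs aside, then emits the slot array zipped with the code order and the sorted extras; Pre_ excludes association lists with duplicate keys, which correspond to no Python dict and whose first-match lookup behaviour is accidental.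
import Mathlib
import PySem

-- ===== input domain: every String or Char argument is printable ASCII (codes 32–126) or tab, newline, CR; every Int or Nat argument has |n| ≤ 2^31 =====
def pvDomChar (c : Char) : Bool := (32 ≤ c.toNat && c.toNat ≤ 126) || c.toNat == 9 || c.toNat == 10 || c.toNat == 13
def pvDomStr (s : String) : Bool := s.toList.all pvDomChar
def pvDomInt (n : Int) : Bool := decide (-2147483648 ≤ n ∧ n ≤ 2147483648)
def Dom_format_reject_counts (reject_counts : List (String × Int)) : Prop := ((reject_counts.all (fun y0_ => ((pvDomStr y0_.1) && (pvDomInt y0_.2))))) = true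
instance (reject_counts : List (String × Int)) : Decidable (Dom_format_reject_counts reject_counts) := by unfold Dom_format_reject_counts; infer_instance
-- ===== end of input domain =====

-- B replaces A's two emission loops (a scan of the fixed 16-code order with a dict lookup per
-- code building a seen-set, then a second walk over the sorted keys skipping seen codes) by one
-- bucket-placement pass over the items: each known code's count is dropped into a fixed slot
-- array indexed by its rank, unknown (code, count) pairs are collected aside; the output is the
-- slot array zipped with the code order followed by the sorted extras (objective: alternative).

-- REJECT_CODE_ORDER (module constant, shared by both Pythons)
def pvOrder : List String :=
  ["mj","ct","ms","js","sb","de","se","ot","ne","tc","ux","sr","np","md","dn","pl"]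

-- f"{code}={count}" with count = d.get(code, 0) (everywhere A formats a code, it is either
-- looked up with .get(code, 0) or is a key of d, where d[code] = d.get(code, 0))
def pvFmt (d : PySem.Dict String Int) (c : String) : String :=
  c ++ "=" ++ PySem.Int.toStr (d.getD c 0)

-- ===== PORT A =====
def format_reject_counts (reject_counts : List (String × Int)) : String :=
  if reject_counts.isEmpty then "-"
  else
    let d := PySem.Dict.mk reject_counts
    -- first loop: for code in REJECT_CODE_ORDER, state (parts, seen)
    let st := pvOrder.foldl
      (fun (ps : List String × PySem.Set String) code =>
        if d.getD code 0 ≤ 0 then ps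
        else (ps.1 ++ [pvFmt d code], ps.2.add code))
      ([], PySem.Set.empty)
    -- second loop: for code in sorted(reject_counts)
    let parts := (PySem.List.sorted d.keys (fun c => c) false).foldl
      (fun parts code =>
        if st.2.contains code then parts
        else if d.getD code 0 ≤ 0 then parts  -- code ∈ d.keys here, so d[code] = d.get(code, 0)
        else parts ++ [pvFmt d code])
      st.1
    if parts.isEmpty then "-" else PySem.Str.join " " parts

-- ===== PORT B =====
-- RANK = {code: i for i, code in enumerate(REJECT_CODE_ORDER)}
def pvRank : PySem.Dict String Int :=
  (PySem.List.enumerate pvOrder 0).foldl (fun r p => r.insert p.2 p.1) PySem.Dict.empty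

-- f"{c}={n}" for an item pair (c, n)
def pvFmt2 (p : String × Int) : String :=
  p.1 ++ "=" ++ PySem.Int.toStr p.2

def format_reject_counts_alt (reject_counts : List (String × Int)) : String :=
  -- for code, count in reject_counts.items(): bucket into slots / extras
  let st := (PySem.Dict.mk reject_counts).items.foldl
    (fun (se : List Int × List (String × Int)) p =>
      match pvRank.get? p.1 with
      | none => (se.1, se.2 ++ [p])
      | some i => (PySem.List.pySetD se.1 i p.2, se.2))
    (List.replicate 16 0, [])
  -- parts = [f"{c}={n}" for c, n in zip(REJECT_CODE_ORDER, slots) if n > 0]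
  let parts := ((pvOrder.zip st.1).filter (fun p => decide (0 < p.2))).map pvFmt2
  -- parts += [f"{c}={n}" for c, n in sorted(extras, key=lambda p: p[0]) if n > 0]
  let parts := parts ++
    ((PySem.List.sorted st.2 (fun p => p.1) false).filter (fun p => decide (0 < p.2))).map pvFmt2
  if parts.isEmpty then "-" else PySem.Str.join " " parts

-- ===== PRECONDITION & SPEC =====
-- A's argument is a Python dict, whose keys are unique; Pre_ excludes association lists with
-- duplicate keys, which correspond to no dict and on which first-match lookup order is accidental.
def Pre_format_reject_counts (reject_counts : List (String × Int)) : Prop :=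
  (reject_counts.map Prod.fst).Nodup
instance (reject_counts : List (String × Int)) : Decidable (Pre_format_reject_counts reject_counts) := by
  unfold Pre_format_reject_counts; infer_instance

def pvWitness_format_reject_counts : (List (String × Int)) := [("mj", 2), ("xx", 1), ("ct", 0)]

def Spec_format_reject_counts (reject_counts : List (String × Int)) (out : String) : Prop :=
  out = format_reject_counts_alt reject_counts
instance (reject_counts : List (String × Int)) (out : String) : Decidable (Spec_format_reject_counts reject_counts out) := by
  unfold Spec_format_reject_counts; infer_instance

-- ===== CLAIM (what is proved, stated in full; the proofs are below) =====
def Claim_equal_format_reject_counts : Prop :=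
  ∀ (reject_counts : List (String × Int)), Dom_format_reject_counts reject_counts →
    Pre_format_reject_counts reject_counts →
    Spec_format_reject_counts reject_counts (format_reject_counts reject_counts)

-- ===== LEMMAS AND PROOFS =====

-- A's first loop appends the positive fixed-order codes and collects them into the seen-set
theorem pv_loop1 (d : PySem.Dict String Int) (L : List String)
    (p : List String) (s : PySem.Set String) :
    L.foldl (fun (ps : List String × PySem.Set String) code =>
        if d.getD code 0 ≤ 0 then ps
        else (ps.1 ++ [pvFmt d code], ps.2.add code)) (p, s)
      = (p ++ (L.filter (fun c => decide (0 < d.getD c 0))).map (pvFmt d),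
         (L.filter (fun c => decide (0 < d.getD c 0))).foldl PySem.Set.add s) := by
  induction L generalizing p s with
  | nil => simp
  | cons c L ih =>
    by_cases h : d.getD c 0 ≤ 0
    · have h' : ¬ (0 < d.getD c 0) := by omega
      simp [List.foldl_cons, h, h', ih]
    · have h' : (0 < d.getD c 0) := by omega
      simp [List.foldl_cons, h, h', ih]

-- A's second loop appends the positive unseen codes in the traversal order
theorem pv_loop2 (d : PySem.Dict String Int) (s : PySem.Set String) (L : List String)
    (p : List String) :
    L.foldl (fun parts code =>
        if s.contains code then parts
        else if d.getD code 0 ≤ 0 then parts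
        else parts ++ [pvFmt d code]) p
      = p ++ (L.filter (fun c => !decide (c ∈ s) && decide (0 < d.getD c 0))).map (pvFmt d) := by
  induction L generalizing p with
  | nil => simp
  | cons c L ih =>
    simp at ih
    by_cases hs : c ∈ s
    · simp [List.foldl_cons, hs, ih]
    · by_cases h : d.getD c 0 ≤ 0
      · have h' : ¬ (0 < d.getD c 0) := by omega
        simp [List.foldl_cons, hs, h, h', ih]
      · have h' : (0 < d.getD c 0) := by omega
        simp [List.foldl_cons, hs, h, h', ih]

theorem pv_keys_rank : pvRank.keys = pvOrder := by decide

theorem pv_rank_none (c : String) : pvRank.get? c = none ↔ c ∉ pvOrder := by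
  rw [PySem.Dict.get?_eq_none_iff_not_mem_keys, pv_keys_rank]

-- every entry of RANK maps a code to its in-range index
theorem pv_rank_items :
    ∀ p ∈ pvRank.items, 0 ≤ p.2 ∧ p.2.toNat < 16 ∧ pvOrder.getD p.2.toNat "" = p.1 := by decide

theorem pv_rank_some (c : String) (i : Int) (h : pvRank.get? c = some i) :
    0 ≤ i ∧ i.toNat < 16 ∧ pvOrder.getD i.toNat "" = c :=
  pv_rank_items (c, i) (PySem.Dict.mem_items_of_get?_eq_some pvRank h)

-- the fixed order is injective as a getD-indexed family
theorem pv_order_inj : ∀ i j : Fin 16, pvOrder.getD i.1 "" = pvOrder.getD j.1 "" → i = j := by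
  decide

-- B's bucket pass splits into the slot fold and the filtered extras
theorem pv_foldB (L : List (String × Int)) (a1 : List Int) (a2 : List (String × Int)) :
    L.foldl (fun (se : List Int × List (String × Int)) p =>
        match pvRank.get? p.1 with
        | none => (se.1, se.2 ++ [p])
        | some i => (PySem.List.pySetD se.1 i p.2, se.2)) (a1, a2)
      = (L.foldl (fun s p =>
            match pvRank.get? p.1 with
            | none => s
            | some i => PySem.List.pySetD s i p.2) a1,
         a2 ++ L.filter (fun p => (pvRank.get? p.1).isNone)) := by
  induction L generalizing a1 a2 with
  | nil => simp
  | cons q L ih =>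
    cases h : pvRank.get? q.1 <;> simp [List.foldl_cons, h, ih]

-- the slot fold over keys, slot by slot
theorem pv_slots (g : String → Int) (K : List String) :
    ∀ (acc : List Int), acc.length = 16 → ∀ j : Nat, j < 16 →
    (K.foldl (fun s c =>
        match pvRank.get? c with
        | none => s
        | some i => PySem.List.pySetD s i (g c)) acc)[j]?
      = if pvOrder.getD j "" ∈ K then some (g (pvOrder.getD j "")) else acc[j]? := by
  induction K with
  | nil => intro acc hacc j hj; simp
  | cons c K ih =>
    intro acc hacc j hj
    have hjo : j < pvOrder.length := by
      have : pvOrder.length = 16 := by decide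
      omega
    cases h : pvRank.get? c with
    | none =>
      have hc : c ∉ pvOrder := (pv_rank_none c).mp h
      have hne : pvOrder.getD j "" ≠ c := by
        intro he
        have hmem : pvOrder.getD j "" ∈ pvOrder := by
          rw [List.getD_eq_getElem pvOrder "" hjo]; exact List.getElem_mem hjo
        exact hc (he ▸ hmem)
      simp only [List.foldl_cons, h]
      rw [ih acc hacc j hj]
      simp only [List.mem_cons, hne, false_or]
    | some i =>
      obtain ⟨hi0, hi16, hic⟩ := pv_rank_some c i h
      simp only [List.foldl_cons, h, PySem.List.pySetD_of_nonneg _ _ hi0]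
      rw [ih (acc.set i.toNat (g c)) (by simp [hacc]) j hj]
      by_cases hm : pvOrder.getD j "" ∈ K
      · rw [if_pos hm, if_pos (List.mem_cons_of_mem c hm)]
      · by_cases hij : i.toNat = j
        · subst hij
          rw [hic] at hm ⊢
          rw [if_neg hm, if_pos (List.mem_cons_self), List.getElem?_set]
          simp [hacc, hi16]
        · have hne : pvOrder.getD j "" ≠ c := by
            intro he
            exact hij (congrArg Fin.val
              (pv_order_inj ⟨i.toNat, hi16⟩ ⟨j, hj⟩ (hic.trans he.symm)))
          rw [if_neg hm,
              if_neg (fun hx => (List.mem_cons.mp hx).elim hne hm),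
              List.getElem?_set, if_neg hij]

-- the slot fold preserves the length
theorem pv_slots_len (g : String → Int) (K : List String) (acc : List Int) :
    (K.foldl (fun s c =>
        match pvRank.get? c with
        | none => s
        | some i => PySem.List.pySetD s i (g c)) acc).length = acc.length := by
  induction K generalizing acc with
  | nil => rfl
  | cons c K ih =>
    cases h : pvRank.get? c <;>
      simp [List.foldl_cons, h, ih, PySem.List.length_pySetD]

-- the final slot array is the counts of the fixed order, in order
theorem pv_slots_eq (d : PySem.Dict String Int) (hK : d.keys.Nodup) :
    d.items.foldl (fun s p =>
        match pvRank.get? p.1 with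
        | none => s
        | some i => PySem.List.pySetD s i p.2) (List.replicate 16 0)
      = pvOrder.map (fun c => d.getD c 0) := by
  rw [PySem.Dict.items_eq_map_keys d hK 0, List.foldl_map]
  apply List.ext_getElem?
  intro j
  by_cases hj : j < 16
  · have hjo : j < pvOrder.length := by
      have : pvOrder.length = 16 := by decide
      omega
    rw [pv_slots (fun c => d.getD c 0) d.keys (List.replicate 16 0) (by simp) j hj,
        List.getElem?_map, List.getElem?_eq_getElem hjo, Option.map_some,
        ← List.getD_eq_getElem pvOrder "" hjo]
    by_cases hm : pvOrder.getD j "" ∈ d.keys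
    · rw [if_pos hm]
    · rw [if_neg hm, List.getElem?_replicate, if_pos hj,
          PySem.Dict.getD_of_get?_eq_none d 0
            ((PySem.Dict.get?_eq_none_iff_not_mem_keys d _).mpr hm)]
  · have h1 : (d.keys.foldl (fun s c =>
        match pvRank.get? c with
        | none => s
        | some i => PySem.List.pySetD s i (d.getD c 0)) (List.replicate 16 0)).length = 16 := by
      rw [pv_slots_len]; simp
    have h2 : (pvOrder.map (fun c => d.getD c 0)).length = 16 := by
      rw [List.length_map]; decide
    rw [List.getElem?_eq_none (by rw [h1]; omega),
        List.getElem?_eq_none (by rw [h2]; omega)]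

-- B's first comprehension is A's fixed-order parts
theorem pv_partB1 (d : PySem.Dict String Int) :
    ((pvOrder.zip (pvOrder.map (fun c => d.getD c 0))).filter
        (fun p => decide (0 < p.2))).map pvFmt2
      = (pvOrder.filter (fun c => decide (0 < d.getD c 0))).map (pvFmt d) := by
  have hz : pvOrder.zip (pvOrder.map (fun c => d.getD c 0))
      = pvOrder.map (fun c => (c, d.getD c 0)) := by
    simpa using (List.zip_map' (f := id) (g := fun c => d.getD c 0) (l := pvOrder))
  rw [hz, List.filter_map, List.map_map]
  rfl

-- filtering commutes with alphabetical sorting (on a duplicate-free list)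
theorem pv_sorted_filter (K : List String) (hK : K.Nodup) (q : String → Bool) :
    PySem.List.sorted (K.filter q) (fun c => c) false
      = (PySem.List.sorted K (fun c => c) false).filter q := by
  apply PySem.List.sorted_eq_of_perm_of_pairwise_lt
  · exact List.Perm.filter q (PySem.List.sorted_perm K (fun c => c) false)
  · have hnd : (PySem.List.sorted K (fun c => c) false).Nodup :=
      (List.Perm.nodup_iff (PySem.List.sorted_perm K (fun c => c) false)).mpr hK
    have hle := PySem.List.sorted_pairwise K (fun c => c)
    have hlt : (PySem.List.sorted K (fun c => c) false).Pairwise (fun a b => a < b) := by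
      have := List.Pairwise.and hle hnd
      exact this.imp (fun h => lt_of_le_of_ne h.1 h.2)
    exact List.Pairwise.filter q hlt

-- sorting item pairs by code is sorting the codes, codes carried along
theorem pv_sorted_pairs (d : PySem.Dict String Int) (Kq : List String) (hKq : Kq.Nodup) :
    PySem.List.sorted (Kq.map (fun c => (c, d.getD c 0))) (fun p => p.1) false
      = (PySem.List.sorted Kq (fun c => c) false).map (fun c => (c, d.getD c 0)) := by
  apply PySem.List.sorted_eq_of_perm_of_pairwise_lt
  · exact List.Perm.map _ (PySem.List.sorted_perm Kq (fun c => c) false)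
  · rw [List.pairwise_map]
    have hnd : (PySem.List.sorted Kq (fun c => c) false).Nodup :=
      (List.Perm.nodup_iff (PySem.List.sorted_perm Kq (fun c => c) false)).mpr hKq
    have hle := PySem.List.sorted_pairwise Kq (fun c => c)
    have := List.Pairwise.and hle hnd
    exact this.imp (fun h => lt_of_le_of_ne h.1 h.2)

-- B's extras comprehension is A's second-loop parts
theorem pv_partB2 (d : PySem.Dict String Int) (L : List (String × Int))
    (hL : L = d.items) (hK : d.keys.Nodup) :
    ((PySem.List.sorted (L.filter (fun p => (pvRank.get? p.1).isNone))
        (fun p => p.1) false).filter (fun p => decide (0 < p.2))).map pvFmt2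
      = ((PySem.List.sorted d.keys (fun c => c) false).filter
          (fun c => !decide (c ∈ PySem.Set.ofList
              (pvOrder.filter (fun c => decide (0 < d.getD c 0)))) && decide (0 < d.getD c 0))).map (pvFmt d) := by
  subst hL
  rw [PySem.Dict.items_eq_map_keys d hK 0, List.filter_map]
  have hq : ((fun p : String × Int => (pvRank.get? p.1).isNone) ∘
      (fun c => (c, d.getD c 0))) = fun c => (pvRank.get? c).isNone := rfl
  rw [hq, pv_sorted_pairs d _ (hK.filter _), List.filter_map, List.map_map,
      pv_sorted_filter d.keys hK]
  have hp : ((fun p : String × Int => decide (0 < p.2)) ∘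
      (fun c => (c, d.getD c 0))) = fun c => decide (0 < d.getD c 0) := rfl
  rw [hp, List.filter_filter]
  have hf : (pvFmt2 ∘ fun c => (c, d.getD c 0)) = pvFmt d := rfl
  rw [hf]
  congr 1
  apply List.filter_congr
  intro c hc
  by_cases hp : 0 < d.getD c 0
  · by_cases ho : c ∈ pvOrder
    · have : ¬ (pvRank.get? c = none) := fun h => (pv_rank_none c).mp h ho
      simp [hp, ho, Option.isSome_iff_ne_none, this,
        PySem.Set.mem_ofList, List.mem_filter]
    · simp [hp, ho, (pv_rank_none c).mpr ho,
        PySem.Set.mem_ofList, List.mem_filter]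
  · simp [hp]

-- ===== VERDICT (by name: the statement is the Claim_ definition above) =====
theorem format_reject_counts_spec : Claim_equal_format_reject_counts := by
  intro rc hdom hpre
  unfold Spec_format_reject_counts
  by_cases he : rc.isEmpty
  · have : rc = [] := List.isEmpty_iff.mp he
    subst this
    rfl
  · have hK : (PySem.Dict.mk rc).keys.Nodup := by
      simpa [PySem.Dict.keys_mk] using hpre
    unfold format_reject_counts format_reject_counts_alt
    rw [if_neg (by simpa using he)]
    simp only []
    rw [pv_loop1, pv_loop2, pv_foldB, pv_slots_eq _ hK]
    dsimp only [PySem.Set.empty]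
    simp only [← PySem.Set.ofList_eq_foldl, List.nil_append]
    rw [pv_partB1, pv_partB2 (PySem.Dict.mk rc) _ rfl hK]
    rfl
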